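-- pv_equiv track=rewrite | github.com/ark2016/VK-Technopark-project-2024 | data_mining/tests/functions/file_241_260.py | find_numbers_with_sum_divisible_by_4
-- ===== SOURCE A (Python) =====
-- def find_numbers_with_sum_divisible_by_4(lst1, lst2):
--     result = []
--     for num1 in lst1:
--         for num2 in lst2:
--             if (num1 + num2) % 4 == 0:
--                 result.append((num1, num2))
--     if not result:
--         return None
--     return result
-- ===== SOURCE B (Python) =====
-- def find_numbers_with_sum_divisible_by_4(lst1, lst2):
--     # Bucket lst2 by residue mod 4 once; each num1 scans only its matching bucket.
--     buckets = {0: [], 1: [], 2: [], 3: []}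
--     for num2 in lst2:
--         buckets[num2 % 4].append(num2)
--     result = []
--     for num1 in lst1:
--         for num2 in buckets[(-num1) % 4]:
--             result.append((num1, num2))
--     if not result:
--         return None
--     return result
-- ===== Notes on version B (the rewrite author's own statement) =====
-- stated objective: faster
-- what changed: B buckets lst2 by residue mod 4 in one pass and, for each element of lst1, scans only the single matching bucket instead of all of lst2.
import Mathlib
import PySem

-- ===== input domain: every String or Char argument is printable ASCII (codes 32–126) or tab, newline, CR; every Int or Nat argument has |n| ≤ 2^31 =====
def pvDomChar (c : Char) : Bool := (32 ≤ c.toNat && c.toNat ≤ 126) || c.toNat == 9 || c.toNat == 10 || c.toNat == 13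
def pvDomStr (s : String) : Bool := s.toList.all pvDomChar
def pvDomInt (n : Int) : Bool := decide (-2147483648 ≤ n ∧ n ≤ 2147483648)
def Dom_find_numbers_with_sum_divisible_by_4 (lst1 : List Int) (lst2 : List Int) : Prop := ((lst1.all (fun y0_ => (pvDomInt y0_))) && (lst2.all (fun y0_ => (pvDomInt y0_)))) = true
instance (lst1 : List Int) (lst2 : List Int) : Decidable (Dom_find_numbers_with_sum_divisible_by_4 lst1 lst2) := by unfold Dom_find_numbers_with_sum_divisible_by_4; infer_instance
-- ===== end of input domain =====

-- B buckets lst2 by residue mod 4 in one pass and scans only the matching bucket per element of lst1 (faster: O(n+m+output) vs A's O(n*m)).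

-- ===== PORT A =====
def find_numbers_with_sum_divisible_by_4 (lst1 : List Int) (lst2 : List Int) : Option (List (Int × Int)) :=
  let result : List (Int × Int) :=
    lst1.foldl (fun acc num1 =>
      lst2.foldl (fun acc2 num2 =>
        if PySem.Int.mod (num1 + num2) 4 == 0 then acc2 ++ [(num1, num2)] else acc2) acc) []
  if result = [] then none else some result

-- ===== PORT B =====
def find_numbers_with_sum_divisible_by_4_alt (lst1 : List Int) (lst2 : List Int) : Option (List (Int × Int)) :=
  let buckets0 : PySem.Dict Int (List Int) :=
    ((((PySem.Dict.empty).insert 0 []).insert 1 []).insert 2 []).insert 3 []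
  let buckets := lst2.foldl (fun d num2 => d.modify (PySem.Int.mod num2 4) [] (fun l => l ++ [num2])) buckets0
  let result : List (Int × Int) :=
    lst1.foldl (fun acc num1 =>
      (buckets.getD (PySem.Int.mod (-num1) 4) []).foldl (fun acc2 num2 => acc2 ++ [(num1, num2)]) acc) []
  if result = [] then none else some result

-- ===== PRECONDITION & SPEC =====
def Spec_find_numbers_with_sum_divisible_by_4 (lst1 : List Int) (lst2 : List Int) (out : Option (List (Int × Int))) : Prop := out = find_numbers_with_sum_divisible_by_4_alt lst1 lst2
instance (lst1 : List Int) (lst2 : List Int) (out : Option (List (Int × Int))) : Decidable (Spec_find_numbers_with_sum_divisible_by_4 lst1 lst2 out) := by unfold Spec_find_numbers_with_sum_divisible_by_4; infer_instance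

-- ===== CLAIM (what is proved, stated in full; the proofs are below) =====
def Claim_equal_find_numbers_with_sum_divisible_by_4 : Prop := ∀ (lst1 : List Int) (lst2 : List Int), Dom_find_numbers_with_sum_divisible_by_4 lst1 lst2 → Spec_find_numbers_with_sum_divisible_by_4 lst1 lst2 (find_numbers_with_sum_divisible_by_4 lst1 lst2)

-- ===== LEMMAS AND PROOFS =====

-- the bucket built by B holds exactly the elements of lst2 with the given residue, in order
theorem pv_bucket_eq (lst2 : List Int) (d : PySem.Dict Int (List Int)) (r : Int) :
    ((lst2.foldl (fun d num2 => d.modify (PySem.Int.mod num2 4) [] (fun l => l ++ [num2])) d).getD r [])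
      = d.getD r [] ++ lst2.filter (fun n => PySem.Int.mod n 4 == r) := by
  induction lst2 generalizing d with
  | nil => simp
  | cons x xs ih =>
    simp only [List.foldl_cons, List.filter_cons, ih, PySem.Dict.getD_modify]
    rcases eq_or_ne (x % 4) r with h | h
    · simp [h]
    · simp [h, Ne.symm h]

-- A's inner test agrees with B's residue selection
theorem pv_filter_congr (num1 : Int) (lst2 : List Int) :
    lst2.filter (fun n2 => PySem.Int.mod (num1 + n2) 4 == 0)
      = lst2.filter (fun n => PySem.Int.mod n 4 == PySem.Int.mod (-num1) 4) := by
  apply List.filter_congr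
  intro n2 _
  have h1 : PySem.Int.mod (num1 + n2) 4 = (num1 + n2) % 4 := PySem.Int.mod_eq_emod_of_pos (by norm_num)
  have h2 : PySem.Int.mod n2 4 = n2 % 4 := PySem.Int.mod_eq_emod_of_pos (by norm_num)
  have h3 : PySem.Int.mod (-num1) 4 = (-num1) % 4 := PySem.Int.mod_eq_emod_of_pos (by norm_num)
  simp only [h1, h2, h3]
  rw [Bool.eq_iff_iff]
  simp only [beq_iff_eq]
  omega

theorem pv_loops_eq (lst1 lst2 : List Int) (acc : List (Int × Int)) :
    lst1.foldl (fun acc num1 =>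
        lst2.foldl (fun acc2 num2 =>
          if PySem.Int.mod (num1 + num2) 4 == 0 then acc2 ++ [(num1, num2)] else acc2) acc) acc
    = lst1.foldl (fun acc num1 =>
        ((lst2.foldl (fun d num2 => d.modify (PySem.Int.mod num2 4) [] (fun l => l ++ [num2]))
            (((((PySem.Dict.empty).insert 0 []).insert 1 []).insert 2 []).insert 3 [])).getD
          (PySem.Int.mod (-num1) 4) []).foldl (fun acc2 num2 => acc2 ++ [(num1, num2)]) acc) acc := by
  induction lst1 generalizing acc with
  | nil => rfl
  | cons x xs ih =>
    simp only [List.foldl_cons]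
    rw [PySem.List.foldl_append_if (p := fun n2 => PySem.Int.mod (x + n2) 4 == 0)
          (f := fun n2 => ((x : Int), n2)),
        PySem.List.foldl_append_singleton_eq_map (f := fun n2 => ((x : Int), n2)),
        pv_bucket_eq, pv_filter_congr]
    have hd : (((((PySem.Dict.empty (κ := Int) (ν := List Int)).insert 0 []).insert 1 []).insert 2 []).insert 3 []).getD (PySem.Int.mod (-x) 4) [] = [] := by
      have h3 : PySem.Int.mod (-x) 4 = (-x) % 4 := PySem.Int.mod_eq_emod_of_pos (by norm_num)
      have : PySem.Int.mod (-x) 4 = 0 ∨ PySem.Int.mod (-x) 4 = 1 ∨ PySem.Int.mod (-x) 4 = 2 ∨ PySem.Int.mod (-x) 4 = 3 := by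
        rw [h3]; omega
      rcases this with h | h | h | h <;> rw [h] <;> decide
    rw [hd]
    simp only [List.nil_append]
    exact ih _

-- ===== VERDICT (by name: the statement is the Claim_ definition above) =====
theorem find_numbers_with_sum_divisible_by_4_spec : Claim_equal_find_numbers_with_sum_divisible_by_4 := by
  intro lst1 lst2 _
  unfold Spec_find_numbers_with_sum_divisible_by_4 find_numbers_with_sum_divisible_by_4 find_numbers_with_sum_divisible_by_4_alt
  simp only [pv_loops_eq]
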